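-- pv_equiv track=rewrite | github.com/Matt115A/uht-tooling-packaged | src/uht_tooling/workflows/design_kld.py | pick_mutant_codon
-- ===== SOURCE A (Python) =====
-- from typing import List, Optional, Tuple
--
-- def codon_table():
--     return {
--         "TTT": "F", "TTC": "F", "TTA": "L", "TTG": "L",
--         "TCT": "S", "TCC": "S", "TCA": "S", "TCG": "S",
--         "TAT": "Y", "TAC": "Y", "TAA": "*", "TAG": "*",
--         "TGT": "C", "TGC": "C", "TGA": "*", "TGG": "W",
--         "CTT": "L", "CTC": "L", "CTA": "L", "CTG": "L",
--         "CCT": "P", "CCC": "P", "CCA": "P", "CCG": "P",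
--         "CAT": "H", "CAC": "H", "CAA": "Q", "CAG": "Q",
--         "CGT": "R", "CGC": "R", "CGA": "R", "CGG": "R",
--         "ATT": "I", "ATC": "I", "ATA": "I", "ATG": "M",
--         "ACT": "T", "ACC": "T", "ACA": "T", "ACG": "T",
--         "AAT": "N", "AAC": "N", "AAA": "K", "AAG": "K",
--         "AGT": "S", "AGC": "S", "AGA": "R", "AGG": "R",
--         "GTT": "V", "GTC": "V", "GTA": "V", "GTG": "V",
--         "GCT": "A", "GCC": "A", "GCA": "A", "GCG": "A",
--         "GAT": "D", "GAC": "D", "GAA": "E", "GAG": "E",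
--         "GGT": "G", "GGC": "G", "GGA": "G", "GGG": "G",
--     }
--
-- def pick_mutant_codon(wt_codon: str, target_aa: str) -> Optional[str]:
--     """Pick the codon for target_aa that differs minimally from wt_codon."""
--     best_list = []
--     for codon, aa in codon_table().items():
--         if aa == target_aa:
--             diff = sum(a != b for a, b in zip(codon.upper(), wt_codon.upper()))
--             best_list.append((codon.upper(), diff))
--     if not best_list:
--         return None
--     best_list.sort(key=lambda x: x[1])
--     return best_list[0][0]
-- ===== SOURCE B (Python) =====
-- from typing import Optional
--
-- _BASES = "TCAG"
-- _AAS = "FFLLSSSSYY**CC*WLLLLPPPPHHQQRRRRIIIMTTTTNNKKSSRRVVVVAAAADDEEGGGG"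
--
-- def codon_table():
--     return {_BASES[i] + _BASES[j] + _BASES[k]: _AAS[16 * i + 4 * j + k]
--             for i in range(4) for j in range(4) for k in range(4)}
--
-- def pick_mutant_codon(wt_codon: str, target_aa: str) -> Optional[str]:
--     """Pick the codon for target_aa that differs minimally from wt_codon.
--
--     Best-first search over the (tiny) range of possible mismatch counts:
--     for d = 0,1,2,3 return the first matching codon at Hamming distance d.
--     """
--     w = wt_codon.upper()
--     candidates = [c for c, aa in codon_table().items() if aa == target_aa]
--     for d in range(4):
--         for c in candidates:
--             if sum(x != y for x, y in zip(c, w)) == d: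
--                 return c
--     return None
-- ===== Notes on version B (the rewrite author's own statement) =====
-- stated objective: alternative
-- what changed: Replaced collecting all matching codons and stable-sorting them by mismatch count with a best-first scan over the bounded distance range d=0..3 that returns the first candidate at distance d, and the 64-entry table literal with a comprehension over base/amino-acid strings.
import Mathlib
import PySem

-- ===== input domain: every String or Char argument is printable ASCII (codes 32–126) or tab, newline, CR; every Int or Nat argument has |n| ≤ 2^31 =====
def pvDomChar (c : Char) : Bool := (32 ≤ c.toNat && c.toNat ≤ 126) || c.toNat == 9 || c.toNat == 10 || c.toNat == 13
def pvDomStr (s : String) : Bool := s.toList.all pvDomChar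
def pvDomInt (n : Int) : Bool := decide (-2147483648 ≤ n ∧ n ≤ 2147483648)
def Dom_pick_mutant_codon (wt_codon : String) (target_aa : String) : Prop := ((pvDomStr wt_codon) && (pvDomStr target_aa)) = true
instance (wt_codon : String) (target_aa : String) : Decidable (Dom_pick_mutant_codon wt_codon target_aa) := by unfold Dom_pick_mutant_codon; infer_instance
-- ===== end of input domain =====

-- B replaces A's collect-all-then-stable-sort with a best-first scan over the possible
-- mismatch counts d = 0,1,2,3 (and builds the codon table from base/amino-acid strings
-- instead of a 64-entry literal): simpler, same results.

-- ===== PORT A =====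
-- the module's codon_table() dict, as an insertion-ordered association list
def pvCodonTable : List (String × String) := [
  ("TTT", "F"), ("TTC", "F"), ("TTA", "L"), ("TTG", "L"),
  ("TCT", "S"), ("TCC", "S"), ("TCA", "S"), ("TCG", "S"),
  ("TAT", "Y"), ("TAC", "Y"), ("TAA", "*"), ("TAG", "*"),
  ("TGT", "C"), ("TGC", "C"), ("TGA", "*"), ("TGG", "W"),
  ("CTT", "L"), ("CTC", "L"), ("CTA", "L"), ("CTG", "L"),
  ("CCT", "P"), ("CCC", "P"), ("CCA", "P"), ("CCG", "P"),
  ("CAT", "H"), ("CAC", "H"), ("CAA", "Q"), ("CAG", "Q"),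
  ("CGT", "R"), ("CGC", "R"), ("CGA", "R"), ("CGG", "R"),
  ("ATT", "I"), ("ATC", "I"), ("ATA", "I"), ("ATG", "M"),
  ("ACT", "T"), ("ACC", "T"), ("ACA", "T"), ("ACG", "T"),
  ("AAT", "N"), ("AAC", "N"), ("AAA", "K"), ("AAG", "K"),
  ("AGT", "S"), ("AGC", "S"), ("AGA", "R"), ("AGG", "R"),
  ("GTT", "V"), ("GTC", "V"), ("GTA", "V"), ("GTG", "V"),
  ("GCT", "A"), ("GCC", "A"), ("GCA", "A"), ("GCG", "A"),
  ("GAT", "D"), ("GAC", "D"), ("GAA", "E"), ("GAG", "E"),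
  ("GGT", "G"), ("GGC", "G"), ("GGA", "G"), ("GGG", "G")]

-- A's diff = sum(a != b for a, b in zip(codon.upper(), wt_codon.upper()))
def pvDiff (codon : String) (wt : String) : Int :=
  (((PySem.Str.upper codon).toList.zip (PySem.Str.upper wt).toList).map
    (fun p => if p.1 ≠ p.2 then (1 : Int) else 0)).sum

def pick_mutant_codon (wt_codon : String) (target_aa : String) : Option String :=
  let best_list := pvCodonTable.foldl
    (fun acc p =>
      if p.2 = target_aa then acc ++ [(PySem.Str.upper p.1, pvDiff p.1 wt_codon)] else acc) []
  if best_list = [] then none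
  else (PySem.List.sorted best_list (fun x => x.2) false).head?.map (fun x => x.1)

-- ===== PORT B =====
def pvBases : String := "TCAG"
def pvAAs : String := "FFLLSSSSYY**CC*WLLLLPPPPHHQQRRRRIIIMTTTTNNKKSSRRVVVVAAAADDEEGGGG"

-- B's codon_table(): the dict comprehension over i, j, k in range(4); the string
-- indexings are always in range, so the `.getD ""` default is never taken.
def pvGenTable : List (String × String) :=
  (PySem.List.pyRange 0 4 1).flatMap fun i =>
    (PySem.List.pyRange 0 4 1).flatMap fun j =>
      (PySem.List.pyRange 0 4 1).map fun k =>
        (((PySem.Str.pyGet? pvBases i).getD ' ').toString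
           ++ ((PySem.Str.pyGet? pvBases j).getD ' ').toString
           ++ ((PySem.Str.pyGet? pvBases k).getD ' ').toString,
         ((PySem.Str.pyGet? pvAAs (16*i + 4*j + k)).getD ' ').toString)

-- B's diff of a candidate against the already-uppercased wt
def altDiff (c : String) (w : String) : Int :=
  ((c.toList.zip w.toList).map (fun p => if p.1 ≠ p.2 then (1 : Int) else 0)).sum

-- the two nested `for` loops with early return: for d in ds, return the first
-- candidate at distance d
def altScan (w : String) (cands : List String) : List Int → Option String
  | [] => none
  | d :: ds =>
    match cands.find? (fun c => decide (altDiff c w = d)) with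
    | some c => some c
    | none => altScan w cands ds

def pick_mutant_codon_alt (wt_codon : String) (target_aa : String) : Option String :=
  let w := PySem.Str.upper wt_codon
  let candidates := (pvGenTable.filter (fun p => p.2 = target_aa)).map Prod.fst
  altScan w candidates (PySem.List.pyRange 0 4 1)

-- ===== PRECONDITION & SPEC =====
def Spec_pick_mutant_codon (wt_codon : String) (target_aa : String) (out : Option String) : Prop := out = pick_mutant_codon_alt wt_codon target_aa
instance (wt_codon : String) (target_aa : String) (out : Option String) : Decidable (Spec_pick_mutant_codon wt_codon target_aa out) := by unfold Spec_pick_mutant_codon; infer_instance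

-- ===== CLAIM (what is proved, stated in full; the proofs are below) =====
def Claim_equal_pick_mutant_codon : Prop := ∀ (wt_codon : String) (target_aa : String), Dom_pick_mutant_codon wt_codon target_aa → Spec_pick_mutant_codon wt_codon target_aa (pick_mutant_codon wt_codon target_aa)

-- ===== LEMMAS AND PROOFS =====

-- B's generated table is A's literal table (a closed computation).
theorem genTable_eq : pvGenTable = pvCodonTable := by decide

-- min?'s fold step, named
def mstep : Option (String × Int) → (String × Int) → Option (String × Int) :=
  fun acc x => match acc with | none => some x | some m => if x.2 < m.2 then some x else some m

theorem min?_eq_foldl (l : List (String × Int)) :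
    PySem.List.min? l (fun p => p.2) = l.foldl mstep none := by
  unfold PySem.List.min? mstep; congr 1; funext a x; cases a <;> rfl

-- once the accumulator's key is a lower bound of the rest, it never changes
theorem foldl_mstep_keep (l : List (String × Int)) (b : String × Int)
    (h : ∀ x ∈ l, b.2 ≤ x.2) : l.foldl mstep (some b) = some b := by
  induction l with
  | nil => rfl
  | cons x t ih =>
    have hx : ¬ x.2 < b.2 := not_lt.mpr (h x (by simp))
    simp only [List.foldl_cons, mstep, hx, if_false]
    exact ih (fun y hy => h y (by simp [hy]))

-- if m is a lower bound and some element attains it, the fold lands on the FIRST such element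
theorem foldl_mstep_find (l : List (String × Int)) (b : String × Int) (m : Int)
    (p : String × Int) (hb : m < b.2) (hlo : ∀ x ∈ l, m ≤ x.2)
    (hf : l.find? (fun x => decide (x.2 = m)) = some p) :
    l.foldl mstep (some b) = some p := by
  induction l generalizing b with
  | nil => simp at hf
  | cons x t ih =>
    by_cases hx : x.2 = m
    · have hp : x = p := by
        rw [List.find?_cons_of_pos (by simpa using hx)] at hf
        exact Option.some.inj hf
      have hlt : x.2 < b.2 := hx ▸ hb
      simp only [List.foldl_cons, mstep, hlt, if_true]
      rw [← hp]
      exact foldl_mstep_keep t x (fun y hy => hx ▸ hlo y (by simp [hy]))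
    · rw [List.find?_cons_of_neg (by simpa using hx)] at hf
      have hxm : m < x.2 := lt_of_le_of_ne (hlo x (by simp)) (Ne.symm hx)
      have hlo' : ∀ y ∈ t, m ≤ y.2 := fun y hy => hlo y (by simp [hy])
      simp only [List.foldl_cons, mstep]
      by_cases hxb : x.2 < b.2
      · simp only [hxb, if_true]; exact ih x hxm hlo' hf
      · simp only [hxb, if_false]; exact ih b hb hlo' hf

theorem min?_find (l : List (String × Int)) (m : Int) (p : String × Int)
    (hlo : ∀ x ∈ l, m ≤ x.2) (hf : l.find? (fun x => decide (x.2 = m)) = some p) :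
    PySem.List.min? l (fun x => x.2) = some p := by
  cases l with
  | nil => simp at hf
  | cons x t =>
    rw [min?_eq_foldl]
    simp only [List.foldl_cons]
    have hstep : mstep none x = some x := rfl
    rw [hstep]
    by_cases hx : x.2 = m
    · have hp : x = p := by
        rw [List.find?_cons_of_pos (by simpa using hx)] at hf
        exact Option.some.inj hf
      rw [← hp]
      exact foldl_mstep_keep t x (fun y hy => hx ▸ hlo y (by simp [hy]))
    · rw [List.find?_cons_of_neg (by simpa using hx)] at hf
      exact foldl_mstep_find t x m p (lt_of_le_of_ne (hlo x (by simp)) (Ne.symm hx))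
        (fun y hy => hlo y (by simp [hy])) hf

-- B's best-first scan over an ascending distance list computes the first key-minimal candidate
theorem altScan_eq_min (w : String) : ∀ (ds : List Int), ds.Pairwise (· ≤ ·) →
    ∀ (cands : List String), (∀ c ∈ cands, altDiff c w ∈ ds) →
    altScan w cands ds
      = (PySem.List.min? (cands.map fun c => (c, altDiff c w)) (fun p => p.2)).map (fun p => p.1) := by
  intro ds
  induction ds with
  | nil =>
    intro _ cands h
    cases cands with
    | nil => rfl
    | cons c t => exact absurd (h c (by simp)) (by simp)
  | cons d ds ih =>
    intro hds cands h
    have hdle : ∀ c ∈ cands, d ≤ altDiff c w := by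
      intro c hc
      rcases List.mem_cons.mp (h c hc) with heq | hmem
      · exact le_of_eq heq.symm
      · exact (List.pairwise_cons.mp hds).1 _ hmem
    cases hf : cands.find? (fun c => decide (altDiff c w = d)) with
    | some c =>
      have hfp : (cands.map fun c => (c, altDiff c w)).find? (fun x => decide (x.2 = d))
          = some (c, altDiff c w) := by
        rw [List.find?_map]
        have hco : ((fun x : String × Int => decide (x.2 = d)) ∘ fun c => (c, altDiff c w))
            = fun c => decide (altDiff c w = d) := rfl
        rw [hco, hf]; rfl
      have hlo : ∀ x ∈ (cands.map fun c => (c, altDiff c w)), d ≤ x.2 := by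
        intro x hx
        obtain ⟨c', hc', rfl⟩ := List.mem_map.mp hx
        exact hdle c' hc'
      have hmin := min?_find (cands.map fun c => (c, altDiff c w)) d (c, altDiff c w) hlo hfp
      simp only [altScan, hf, hmin, Option.map_some]
    | none =>
      have hne : ∀ c ∈ cands, altDiff c w ≠ d := by
        intro c hc
        have := List.find?_eq_none.mp hf c hc
        simpa using this
      have h' : ∀ c ∈ cands, altDiff c w ∈ ds := by
        intro c hc
        rcases List.mem_cons.mp (h c hc) with heq | hmem
        · exact absurd heq (hne c hc)
        · exact hmem
      simp only [altScan, hf]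
      exact ih (List.pairwise_cons.mp hds).2 cands h'

-- bounds on B's diff: a sum of 0/1 terms over a zip
theorem altDiff_nonneg_le (c w : String) :
    0 ≤ altDiff c w ∧ altDiff c w ≤ (c.toList.zip w.toList).length := by
  unfold altDiff
  induction (c.toList.zip w.toList) with
  | nil => simp
  | cons p t ih =>
    obtain ⟨ih1, ih2⟩ := ih
    simp only [List.map_cons, List.sum_cons, List.length_cons]
    constructor <;> split_ifs <;> push_cast at * <;> omega

-- every key of the table is a 3-letter string
theorem table_len3 : ∀ p ∈ pvCodonTable, p.1.toList.length = 3 := by decide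
-- the table is already uppercase, so A's codon.upper() is the identity on it
theorem table_upper : ∀ p ∈ pvCodonTable, PySem.Str.upper p.1 = p.1 := by decide

-- The head of the stable sort is the FIRST key-minimal element, i.e. exactly Python's min().
theorem head_sorted_eq_min {α κ : Type} [LinearOrder κ] (xs : List α) (key : α → κ) :
    (PySem.List.sorted xs key false).head? = PySem.List.min? xs key := by
  induction xs using List.reverseRecOn with
  | nil => rfl
  | append_singleton l x ih =>
    have hs : PySem.List.sorted (l ++ [x]) key false
        = PySem.List.insertBy (fun a b => decide (key a < key b)) x (PySem.List.sorted l key false) := by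
      simp [PySem.List.sorted, List.foldl_append]
    have hm : PySem.List.min? (l ++ [x]) key
        = (match PySem.List.min? l key with
           | none => some x
           | some m => if key x < key m then some x else some m) := by
      unfold PySem.List.min?
      rw [List.foldl_append]
      rfl
    rw [hs, hm]
    cases h : PySem.List.sorted l key false with
    | nil =>
      have hmin : PySem.List.min? l key = none := by rw [← ih, h]; rfl
      rw [hmin]
      simp [PySem.List.insertBy]
    | cons m t =>
      have hmin : PySem.List.min? l key = some m := by rw [← ih, h]; rfl
      rw [hmin]
      by_cases hk : key x < key m <;> simp [PySem.List.insertBy, hk]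

-- A's accumulated best_list is the filtered/mapped candidate list.
theorem best_list_eq (wt_codon target_aa : String) :
    pvCodonTable.foldl
      (fun acc p =>
        if p.2 = target_aa then acc ++ [(PySem.Str.upper p.1, pvDiff p.1 wt_codon)] else acc) []
    = (pvCodonTable.filter (fun p => p.2 = target_aa)).map
        (fun p => (PySem.Str.upper p.1, pvDiff p.1 wt_codon)) := by
  have := PySem.List.foldl_append_if (fun p : String × String => decide (p.2 = target_aa))
    (fun p => (PySem.Str.upper p.1, pvDiff p.1 wt_codon)) pvCodonTable []
  simpa using this

-- ===== VERDICT (by name: the statement is the Claim_ definition above) =====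
theorem pick_mutant_codon_spec : Claim_equal_pick_mutant_codon := by
  intro wt_codon target_aa _
  unfold Spec_pick_mutant_codon pick_mutant_codon pick_mutant_codon_alt
  rw [best_list_eq, genTable_eq]
  set w := PySem.Str.upper wt_codon with hw
  set cands := (pvCodonTable.filter (fun p => p.2 = target_aa)).map Prod.fst with hcands
  have hbl : (pvCodonTable.filter (fun p => p.2 = target_aa)).map
        (fun p => (PySem.Str.upper p.1, pvDiff p.1 wt_codon))
      = cands.map (fun c => (c, altDiff c w)) := by
    rw [hcands, List.map_map]
    apply List.map_congr_left
    intro p hp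
    have hp' := List.mem_of_mem_filter hp
    have hu := table_upper p hp'
    simp only [Function.comp]
    rw [hu]
    have hd : pvDiff p.1 wt_codon = altDiff p.1 w := by
      unfold pvDiff altDiff
      rw [hu, hw]
    rw [hd]
  rw [hbl]
  have hmem : ∀ c ∈ cands, altDiff c w ∈ ([0, 1, 2, 3] : List Int) := by
    intro c hc
    obtain ⟨p, hp, rfl⟩ := List.mem_map.mp hc
    have h3 := table_len3 p (List.mem_of_mem_filter hp)
    have hb := altDiff_nonneg_le p.1 w
    have hzl : (p.1.toList.zip w.toList).length ≤ 3 := by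
      rw [List.length_zip, h3]
      omega
    simp only [List.mem_cons, List.not_mem_nil, or_false]
    omega
  have hrange : PySem.List.pyRange 0 4 1 = ([0, 1, 2, 3] : List Int) := by decide
  rw [hrange, altScan_eq_min w [0, 1, 2, 3] (by decide) cands hmem]
  by_cases hnil : cands.map (fun c => (c, altDiff c w)) = []
  · simp [hnil, PySem.List.min?]
  · simp only [hnil, if_false]
    rw [head_sorted_eq_min]
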